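-- pv_equiv track=rewrite | github.com/the-omega-institute/automath | theory/2026_golden_ratio_driven_scan_projection_generation_recursive_emergence/scripts/exp_fold_zm_s4_s3_nielsen_monodromy_audit.py | _group_from_generators
-- ===== SOURCE A (Python) =====
-- from collections import Counter, defaultdict, deque
-- from typing import DefaultDict, Dict, Iterable, List, Sequence, Tuple
--
-- Perm = Tuple[int, ...]
--
-- def _id_perm(n: int) -> Perm:
--     return tuple(range(n))
--
-- def _compose(p: Perm, q: Perm) -> Perm:
--     # Composition p ∘ q.
--     return tuple(p[q[i]] for i in range(len(p)))
--
-- def _inv(p: Perm) -> Perm: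
--     n = len(p)
--     out = [0] * n
--     for i, j in enumerate(p):
--         out[j] = i
--     return tuple(out)
--
-- def _group_from_generators(gens: Sequence[Perm], n: int) -> set[Perm]:
--     e = _id_perm(n)
--     inv_gens = [_inv(g) for g in gens]
--     all_gens = list(gens) + inv_gens
--     seen: set[Perm] = {e}
--     q: deque[Perm] = deque([e])
--     while q:
--         a = q.popleft()
--         for g in all_gens:
--             b = _compose(a, g)
--             if b not in seen:
--                 seen.add(b)
--                 q.append(b)
--     return seen
-- ===== SOURCE B (Python) =====
-- from typing import Sequence, Tuple
--
-- Perm = Tuple[int, ...]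
--
-- def _compose(p: Perm, q: Perm) -> Perm:
--     # p o q; only the first len(p) positions of q are meaningful
--     return tuple(p[j] for j in q[:len(p)])
--
-- def _inv(p: Perm) -> Perm:
--     # argsort: the inverse permutation sorts the positions by their image
--     return tuple(sorted(range(len(p)), key=p.__getitem__))
--
-- def _group_from_generators(gens: Sequence[Perm], n: int) -> set[Perm]:
--     # Fixed-point saturation: sweep the whole current set against every
--     # generator/inverse until one full sweep adds no new element.
--     e = tuple(range(n))
--     inv_gens = []
--     for g in gens:
--         inv_gens.append(_inv(g))
--     all_gens = list(gens) + inv_gens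
--     cur: set[Perm] = {e}
--     while True:
--         new = set(cur)
--         for a in cur:
--             for g in all_gens:
--                 new.add(_compose(a, g))
--         if len(new) == len(cur):
--             return new
--         cur = new
-- ===== Notes on version B (the rewrite author's own statement) =====
-- stated objective: alternative
-- what changed: Replaces the FIFO worklist BFS (dequeue each element once, membership-test before append) by whole-set fixed-point saturation sweeps until a sweep adds nothing, with the inverse computed by argsort (sorted positions keyed by image) instead of an index-write loop and composition mapped over the right factor instead of index arithmetic over range(len).
-- outside the precondition, e.g. on _group_from_generators([(0, 0)], 2): A returns {(0, 1), (1, 0), (1, 1), (0, 0)}, B returns {(0, 1), (0, 0)}; on _group_from_generators([(-1, -1, 3, 2)], 2): A returns {(0, 1), (1, 1), (0, 0)}, B returns {(0, 1), (1, 1)}; on _group_from_generators([(-1, 2, 1, -2)], 1): A returns {(0,)}, B raises IndexError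
import Mathlib
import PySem

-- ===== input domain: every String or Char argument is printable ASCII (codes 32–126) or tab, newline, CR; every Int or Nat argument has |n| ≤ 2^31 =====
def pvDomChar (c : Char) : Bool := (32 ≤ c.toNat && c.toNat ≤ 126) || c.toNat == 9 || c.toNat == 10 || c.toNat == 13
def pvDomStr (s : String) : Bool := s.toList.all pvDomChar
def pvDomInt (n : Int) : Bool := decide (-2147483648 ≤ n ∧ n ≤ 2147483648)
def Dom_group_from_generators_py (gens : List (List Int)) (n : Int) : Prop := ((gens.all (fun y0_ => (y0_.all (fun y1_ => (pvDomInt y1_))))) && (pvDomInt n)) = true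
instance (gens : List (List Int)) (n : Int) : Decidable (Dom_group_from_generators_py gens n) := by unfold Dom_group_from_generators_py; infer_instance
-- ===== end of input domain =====

-- B replaces A's FIFO-queue BFS closure by whole-set fixed-point saturation sweeps, with an
-- argsort-based inverse and composition mapped over the right factor (alternative
-- decomposition, not faster); return values proved equal on Pre_.

-- ===== PORT A =====
def pyIdPerm (n : Int) : List Int := PySem.List.pyRange 0 n 1

-- out[j] = v with Python's index rule (negative wraps); the unchanged-list branch is only
-- reached where Python raises IndexError, on inputs where A itself raises (outside Pre_)
def pySetItem (xs : List Int) (j : Int) (v : Int) : List Int :=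
  match PySem.List.pyIdx? xs.length j with
  | some k => xs.set k v
  | none => xs

-- tuple(p[q[i]] for i in range(len(p))); the pyGetD default is only read where Python would
-- raise IndexError or wrap a negative index — Pre_ keeps every executed index in range
def pyCompose (p q : List Int) : List Int :=
  (PySem.List.pyRange 0 (p.length : Int) 1).map
    (fun i => PySem.List.pyGetD p (PySem.List.pyGetD q i 0) 0)

def pyInv (p : List Int) : List Int :=
  (PySem.List.enumerate p 0).foldl (fun out ij => pySetItem out ij.2 ij.1)
    (List.replicate p.length 0)

-- the while-q loop; fuel only bounds the number of pops (proved sufficient below)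
def bfsLoop (G : List (List Int)) : Nat → List (List Int) → List (List Int) → List (List Int)
  | 0, seen, _ => seen
  | fuel+1, seen, q =>
    match q with
    | [] => seen
    | a :: q' =>
      let sq := G.foldl
        (fun sq g =>
          let b := pyCompose a g
          if b ∈ sq.1 then sq else (PySem.Set.add sq.1 b, sq.2 ++ [b]))
        (seen, q')
      bfsLoop G fuel sq.1 sq.2

def group_from_generators_py (gens : List (List Int)) (n : Int) : List (List Int) :=
  let e := pyIdPerm n
  let invGens := gens.map pyInv
  let allGens := gens ++ invGens
  bfsLoop allGens (2 * (n.toNat + 1) ^ n.toNat + 2) (PySem.Set.ofList [e]) [e]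

-- ===== PORT B =====
-- tuple(p[j] for j in q[:len(p)]); p[j] ported with pyGet?'s Python index rule via pyGetD, whose
-- default is only read where Python raises IndexError (outside Pre_)
def pyComposeB (p q : List Int) : List Int :=
  (PySem.List.slice q none (some (p.length : Int))).map (fun j => PySem.List.pyGetD p j 0)

-- tuple(sorted(range(len(p)), key=p.__getitem__)); the key is exact on in-range indices
def pyInvB (p : List Int) : List Int :=
  PySem.List.sorted (PySem.List.pyRange 0 (p.length : Int) 1)
    (fun i => PySem.List.pyGetD p i 0)

-- the while-True saturation loop; fuel only bounds the number of sweep rounds (proved sufficient below)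
def sweepLoop (G : List (List Int)) : Nat → List (List Int) → List (List Int)
  | 0, cur => cur
  | fuel+1, cur =>
    let nw := cur.foldl
      (fun nw a => G.foldl (fun nw g => PySem.Set.add nw (pyComposeB a g)) nw)
      (PySem.Set.ofList cur)
    if nw.length = cur.length then nw else sweepLoop G fuel nw

def group_from_generators_py_alt (gens : List (List Int)) (n : Int) : List (List Int) :=
  let invGens := gens.foldl (fun acc g => acc ++ [pyInvB g]) []
  sweepLoop (gens ++ invGens) ((n.toNat + 1) ^ n.toNat + 2)
    (PySem.Set.ofList [PySem.List.pyRange 0 n 1])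

-- ===== PRECONDITION & SPEC =====
-- Pre_ keeps the function's documented domain (gens : Sequence[Perm]): generators that are genuine
-- permutations of range(n) (length n, entries in [0, n), no duplicates), plus the degenerate n ≤ 0
-- case where every composite is the empty tuple; excluded are inputs on which A's returned set is an
-- accident of negative-index wraparound or non-bijective "generators" (duplicates, lengths ≠ n),
-- where B's own algorithm raises IndexError or produces a different set.
def Pre_group_from_generators_py (gens : List (List Int)) (n : Int) : Prop :=
  (∀ g ∈ gens, (g.length : Int) = n ∧ g.Nodup ∧ ∀ x ∈ g, 0 ≤ x ∧ x < n)
  ∨ (n ≤ 0 ∧ ∀ g ∈ gens, ∀ j ∈ g, -(g.length : Int) ≤ j ∧ j < (g.length : Int))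
instance (gens : List (List Int)) (n : Int) : Decidable (Pre_group_from_generators_py gens n) := by
  unfold Pre_group_from_generators_py; infer_instance

def pvWitness_group_from_generators_py : List (List Int) × Int := ([[1, 0]], 2)

def Spec_group_from_generators_py (gens : List (List Int)) (n : Int) (out : List (List Int)) : Prop := out = group_from_generators_py_alt gens n
instance (gens : List (List Int)) (n : Int) (out : List (List Int)) : Decidable (Spec_group_from_generators_py gens n out) := by unfold Spec_group_from_generators_py; infer_instance

-- ===== CLAIM (what is proved, stated in full; the proofs are below) =====
def Claim_equal_group_from_generators_py : Prop := ∀ (gens : List (List Int)) (n : Int), Dom_group_from_generators_py gens n → Pre_group_from_generators_py gens n → Spec_group_from_generators_py gens n (group_from_generators_py gens n)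

-- ===== LEMMAS AND PROOFS =====

-- one element expanded against every generator: the common step of both loops
def stepG (G : List (List Int)) (s : List (List Int)) (a : List Int) : List (List Int) :=
  G.foldl (fun s g => PySem.Set.add s (pyCompose a g)) s

-- A's sweep re-expressed with A's compose: proof-side reference loop
def sweepRef (G : List (List Int)) : Nat → List (List Int) → List (List Int)
  | 0, cur => cur
  | fuel+1, cur =>
    let nw := cur.foldl (stepG G) (PySem.Set.ofList cur)
    if nw.length = cur.length then nw else sweepRef G fuel nw

-- reference index-loop form: process s[k], s[k+1], … (new elements are appended) until the end
def runG (G : List (List Int)) (fuel : Nat) (s : List (List Int)) (k : Nat) : List (List Int) :=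
  match fuel with
  | 0 => s
  | fuel+1 =>
    match s.drop k with
    | [] => s
    | a :: _ => runG G fuel (stepG G s a) (k+1)

-- every element of the closure is a length-m list over [0, m+1): the finiteness invariant
def PermU (m : Nat) (a : List Int) : Prop :=
  a.length = m ∧ ∀ x ∈ a, 0 ≤ x ∧ x < ((m : Int) + 1)

def InvS (m : Nat) (s : List (List Int)) : Prop := s.Nodup ∧ ∀ a ∈ s, PermU m a

def Closed (G : List (List Int)) (s : List (List Int)) (k : Nat) : Prop :=
  ∀ a ∈ s.take k, ∀ g ∈ G, pyCompose a g ∈ s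

lemma add_eq_of_mem {s : List (List Int)} {x : List Int} (h : x ∈ s) :
    PySem.Set.add s x = s := by
  simp [PySem.Set.add, PySem.Set.contains, h]

lemma add_eq_append_of_not_mem {s : List (List Int)} {x : List Int} (h : x ∉ s) :
    PySem.Set.add s x = s ++ [x] := by
  simp [PySem.Set.add, PySem.Set.contains, h]

lemma add_prefix (s : List (List Int)) (x : List Int) : s <+: PySem.Set.add s x := by
  by_cases h : x ∈ s
  · simp [add_eq_of_mem h]
  · simp [add_eq_append_of_not_mem h]

lemma step_prefix (G : List (List Int)) (s : List (List Int)) (a : List Int) :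
    s <+: stepG G s a := by
  induction G generalizing s with
  | nil => simp [stepG]
  | cons g G ih =>
    exact (add_prefix s (pyCompose a g)).trans (ih (PySem.Set.add s (pyCompose a g)))

lemma mem_step_of_mem {G : List (List Int)} {s : List (List Int)} {a x : List Int}
    (h : x ∈ s) : x ∈ stepG G s a := (step_prefix G s a).subset h

lemma step_eq_of_closed {G : List (List Int)} {s : List (List Int)} {a : List Int}
    (h : ∀ g ∈ G, pyCompose a g ∈ s) : stepG G s a = s := by
  induction G with
  | nil => rfl
  | cons g G ih =>
    have h1 : pyCompose a g ∈ s := h g (by simp)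
    show stepG G (PySem.Set.add s (pyCompose a g)) a = s
    rw [add_eq_of_mem h1]
    exact ih (fun g' hg' => h g' (by simp [hg']))

lemma mem_step_child {G : List (List Int)} (s : List (List Int)) (a : List Int) :
    ∀ g ∈ G, pyCompose a g ∈ stepG G s a := by
  induction G generalizing s with
  | nil => simp
  | cons g G ih =>
    intro g' hg'
    rcases List.mem_cons.mp hg' with rfl | hg'
    · show pyCompose a g' ∈ stepG G (PySem.Set.add s (pyCompose a g')) a
      exact mem_step_of_mem ((PySem.Set.mem_add s (pyCompose a g') (pyCompose a g')).mpr (Or.inr rfl))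
    · exact ih (PySem.Set.add s (pyCompose a g)) g' hg'

lemma step_mem_cases {G : List (List Int)} {s : List (List Int)} {a x : List Int}
    (h : x ∈ stepG G s a) : x ∈ s ∨ ∃ g ∈ G, x = pyCompose a g := by
  induction G generalizing s with
  | nil => exact Or.inl h
  | cons g G ih =>
    rcases ih h with hx | ⟨g', hg', rfl⟩
    · rcases (PySem.Set.mem_add s (pyCompose a g) x).mp hx with hx | rfl
      · exact Or.inl hx
      · exact Or.inr ⟨g, by simp, rfl⟩
    · exact Or.inr ⟨g', by simp [hg'], rfl⟩

lemma nodup_step {G : List (List Int)} {s : List (List Int)} {a : List Int}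
    (h : s.Nodup) : (stepG G s a).Nodup := by
  induction G generalizing s with
  | nil => exact h
  | cons g G ih => exact ih (PySem.Set.nodup_add s (pyCompose a g) h)

lemma pyGetD_mem_or_eq (xs : List Int) (i d : Int) :
    PySem.List.pyGetD xs i d ∈ xs ∨ PySem.List.pyGetD xs i d = d := by
  unfold PySem.List.pyGetD
  rcases h : PySem.List.pyGet? xs i with _ | v
  · simp
  · left
    simp only [Option.getD_some]
    unfold PySem.List.pyGet? at h
    rcases hk : PySem.List.pyIdx? xs.length i with _ | k
    · simp [hk] at h
    · simp [hk] at h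
      exact List.mem_of_getElem? h

lemma pyCompose_U {m : Nat} {p : List Int} (q : List Int) (hp : PermU m p) :
    PermU m (pyCompose p q) := by
  obtain ⟨hlen, hmem⟩ := hp
  constructor
  · simp only [pyCompose, List.length_map, PySem.List.length_pyRange_one]
    omega
  · intro x hx
    simp only [pyCompose, List.mem_map] at hx
    obtain ⟨i, _, rfl⟩ := hx
    rcases pyGetD_mem_or_eq p (PySem.List.pyGetD q i 0) 0 with h | h
    · exact hmem _ h
    · rw [h]; constructor <;> omega

-- the finite universe: all length-k lists over [0, M)
def allT (M : Nat) : Nat → List (List Int)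
  | 0 => [[]]
  | k+1 => (List.range M).flatMap (fun x => (allT M k).map (fun l => (x : Int) :: l))

lemma length_allT (M : Nat) : ∀ k, (allT M k).length = M ^ k := by
  intro k
  induction k with
  | zero => rfl
  | succ k ih =>
    simp [allT, List.length_flatMap, ih, pow_succ, mul_comm]

lemma mem_allT {M : Nat} : ∀ {k : Nat} {l : List Int}, l.length = k →
    (∀ x ∈ l, 0 ≤ x ∧ x < (M : Int)) → l ∈ allT M k := by
  intro k
  induction k with
  | zero => intro l hl _; simp [allT, List.length_eq_zero_iff.mp hl]
  | succ k ih =>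
    intro l hl hb
    rcases l with _ | ⟨x, t⟩
    · simp at hl
    · have hx := hb x (by simp)
      have h1 : x.toNat < M := by omega
      have h2 : t ∈ allT M k := ih (by simpa using hl) (fun y hy => hb y (by simp [hy]))
      simp only [allT, List.mem_flatMap, List.mem_map]
      refine ⟨x, ?_, t, h2, rfl⟩
      simp
      exact ⟨x.toNat, h1, (Int.toNat_of_nonneg hx.1).symm⟩

lemma card_bound {m : Nat} {s : List (List Int)} (h : InvS m s) :
    s.length ≤ (m + 1) ^ m := by
  have hsub : s ⊆ allT (m + 1) m := by
    intro a ha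
    obtain ⟨hlen, hb⟩ := h.2 a ha
    exact mem_allT hlen (by intro x hx; have := hb x hx; push_cast; omega)
  calc s.length ≤ (allT (m + 1) m).length :=
        (List.subperm_of_subset h.1 hsub).length_le
    _ = (m + 1) ^ m := length_allT _ _

lemma invS_step {m : Nat} {G : List (List Int)} {s : List (List Int)} {a : List Int}
    (h : InvS m s) (ha : PermU m a) : InvS m (stepG G s a) := by
  refine ⟨nodup_step h.1, ?_⟩
  intro x hx
  rcases step_mem_cases hx with hx | ⟨g, _, rfl⟩
  · exact h.2 x hx
  · exact pyCompose_U g ha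

lemma drop_of_prefix_snoc {l m : List (List Int)} {b : List Int}
    (h : (l ++ [b]) <+: m) : m.drop l.length = b :: m.drop (l.length + 1) := by
  obtain ⟨t, rfl⟩ := h
  rw [List.append_assoc, List.drop_left]
  have h2 : ((l ++ [b]) ++ t).drop (l.length + 1) = t := by
    rw [show l.length + 1 = (l ++ [b]).length by simp, List.drop_left]
  rw [List.append_assoc] at h2
  rw [h2]
  rfl

lemma drop_of_prefix_le {l m : List (List Int)} {k : Nat}
    (h : l <+: m) (hk : k ≤ l.length) : m.drop k = l.drop k ++ m.drop l.length := by
  obtain ⟨t, rfl⟩ := h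
  rw [List.drop_append_of_le_length hk, List.drop_left]

lemma bfs_fold (G : List (List Int)) (a : List Int) :
    ∀ (s q' : List (List Int)),
      G.foldl (fun sq g =>
          let b := pyCompose a g
          if b ∈ sq.1 then sq else (PySem.Set.add sq.1 b, sq.2 ++ [b])) (s, q')
        = (stepG G s a, q' ++ (stepG G s a).drop s.length) := by
  induction G with
  | nil => intro s q'; simp [stepG, List.drop_length]
  | cons g G ih =>
    intro s q'
    by_cases hb : pyCompose a g ∈ s
    · simp only [List.foldl_cons, if_pos hb]
      have hstep : stepG (g :: G) s a = stepG G s a := by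
        show stepG G (PySem.Set.add s (pyCompose a g)) a = stepG G s a
        rw [add_eq_of_mem hb]
      rw [ih s q', hstep]
    · simp only [List.foldl_cons, if_neg hb]
      have hadd : PySem.Set.add s (pyCompose a g) = s ++ [pyCompose a g] :=
        add_eq_append_of_not_mem hb
      have hstep : stepG (g :: G) s a = stepG G (s ++ [pyCompose a g]) a := by
        show stepG G (PySem.Set.add s (pyCompose a g)) a = _
        rw [hadd]
      rw [hadd, ih (s ++ [pyCompose a g]) (q' ++ [pyCompose a g]), hstep]
      have hpre : (s ++ [pyCompose a g]) <+: stepG G (s ++ [pyCompose a g]) a :=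
        step_prefix _ _ _
      rw [drop_of_prefix_snoc hpre]
      simp

lemma bfs_eq_run (G : List (List Int)) :
    ∀ (fuel : Nat) (s : List (List Int)) (k : Nat), k ≤ s.length →
      bfsLoop G fuel s (s.drop k) = runG G fuel s k := by
  intro fuel
  induction fuel with
  | zero => intro s k _; rfl
  | succ fuel ih =>
    intro s k hk
    rcases hdrop : s.drop k with _ | ⟨a, rest⟩
    · simp [bfsLoop, runG, hdrop]
    · have hklt : k < s.length := by
        by_contra h
        rw [List.drop_eq_nil_of_le (by omega)] at hdrop
        exact absurd hdrop (by simp)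
      have hrest : rest = s.drop (k + 1) := by
        have : s.drop (k + 1) = (s.drop k).drop 1 := by
          rw [List.drop_drop]
        rw [this, hdrop]
        rfl
      have hq : rest ++ (stepG G s a).drop s.length = (stepG G s a).drop (k + 1) := by
        rw [hrest, ← drop_of_prefix_le (step_prefix G s a) (by omega)]
      have hkl : k + 1 ≤ (stepG G s a).length := by
        have := (step_prefix G s a).length_le
        omega
      simp only [bfsLoop, bfs_fold G a s rest, hq]
      rw [ih (stepG G s a) (k + 1) hkl]
      conv_rhs => rw [runG]
      simp [hdrop]

lemma runG_terminal (G : List (List Int)) (fuel : Nat) (s : List (List Int)) (k : Nat)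
    (h : s.length ≤ k) : runG G fuel s k = s := by
  cases fuel with
  | zero => rfl
  | succ fuel => rw [runG, List.drop_eq_nil_of_le h]

lemma runG_succ (G : List (List Int)) (m : Nat) :
    ∀ (fuel : Nat) (s : List (List Int)) (k : Nat), InvS m s → k ≤ s.length →
      2 * (m + 1) ^ m ≤ fuel + s.length + k →
      runG G (fuel + 1) s k = runG G fuel s k := by
  intro fuel
  induction fuel with
  | zero =>
    intro s k hinv hk hf
    rcases Nat.lt_or_ge k s.length with hklt | hge
    · exfalso
      have := card_bound hinv
      omega
    · rw [runG_terminal G 1 s k hge, runG_terminal G 0 s k hge]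
  | succ fuel ih =>
    intro s k hinv hk hf
    rcases hdrop : s.drop k with _ | ⟨a, rest⟩
    · have hge : s.length ≤ k := by
        by_contra h
        have : s.drop k ≠ [] := by
          simp [List.drop_eq_nil_iff]
          omega
        exact this hdrop
      rw [runG_terminal G _ s k hge, runG_terminal G _ s k hge]
    · have hklt : k < s.length := by
        by_contra h
        rw [List.drop_eq_nil_of_le (by omega)] at hdrop
        simp at hdrop
      have ha : a ∈ s := List.mem_of_mem_drop (by rw [hdrop]; simp)
      have hinv' : InvS m (stepG G s a) := invS_step hinv (hinv.2 a ha)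
      have hlen : s.length ≤ (stepG G s a).length := (step_prefix G s a).length_le
      conv_lhs => rw [runG]
      conv_rhs => rw [runG]
      simp only [hdrop]
      exact ih (stepG G s a) (k + 1) hinv' (by omega) (by omega)

lemma runG_fuel_eq (G : List (List Int)) (m : Nat) (s : List (List Int)) (k : Nat)
    (hinv : InvS m s) (hk : k ≤ s.length) :
    ∀ (fuel₁ fuel₂ : Nat), fuel₁ ≤ fuel₂ → 2 * (m + 1) ^ m ≤ fuel₁ + s.length + k →
      runG G fuel₂ s k = runG G fuel₁ s k := by
  intro fuel₁ fuel₂ hle hf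
  induction fuel₂, hle using Nat.le_induction with
  | base => rfl
  | succ fuel₂ hle ih =>
    rw [runG_succ G m fuel₂ s k hinv hk (by omega), ih]

lemma foldl_step_prefix (G : List (List Int)) :
    ∀ (l : List (List Int)) (s : List (List Int)), s <+: l.foldl (stepG G) s := by
  intro l
  induction l with
  | nil => intro s; simp
  | cons a l ih =>
    intro s
    exact (step_prefix G s a).trans (ih (stepG G s a))

lemma foldl_step_eq_of_closed {G : List (List Int)} :
    ∀ {l s : List (List Int)}, (∀ a ∈ l, ∀ g ∈ G, pyCompose a g ∈ s) →
      l.foldl (stepG G) s = s := by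
  intro l
  induction l with
  | nil => intro s _; rfl
  | cons a l ih =>
    intro s h
    rw [List.foldl_cons, step_eq_of_closed (h a (by simp))]
    exact ih (fun a' ha' => h a' (by simp [ha']))

lemma foldl_step_child {G : List (List Int)} :
    ∀ {l s : List (List Int)} {a : List Int}, a ∈ l → ∀ g ∈ G,
      pyCompose a g ∈ l.foldl (stepG G) s := by
  intro l
  induction l with
  | nil => intro s a h; simp at h
  | cons a' l ih =>
    intro s a h g hg
    rcases List.mem_cons.mp h with rfl | h
    · exact (foldl_step_prefix G l (stepG G s a)).subset (mem_step_child s a g hg)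
    · exact ih h g hg

lemma invS_foldl {m : Nat} {G : List (List Int)} :
    ∀ {l s : List (List Int)}, InvS m s → (∀ a ∈ l, PermU m a) →
      InvS m (l.foldl (stepG G) s) := by
  intro l
  induction l with
  | nil => intro s h _; exact h
  | cons a l ih =>
    intro s h hl
    exact ih (invS_step h (hl a (by simp))) (fun a' ha' => hl a' (by simp [ha']))

lemma run_seg (G : List (List Int)) :
    ∀ (seg : List (List Int)) (fuel : Nat) (s : List (List Int)) (k : Nat)
      (rest : List (List Int)), s.drop k = seg ++ rest →
      runG G (seg.length + fuel) s k = runG G fuel (seg.foldl (stepG G) s) (k + seg.length) := by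
  intro seg
  induction seg with
  | nil => intro fuel s k rest h; simp
  | cons a seg ih =>
    intro fuel s k rest h
    have hklt : k < s.length := by
      by_contra hc
      rw [List.drop_eq_nil_of_le (by omega)] at h
      exact absurd h.symm (by simp)
    have hstep : runG G (seg.length + 1 + fuel) s k = runG G (seg.length + fuel) (stepG G s a) (k + 1) := by
      conv_lhs => rw [show seg.length + 1 + fuel = (seg.length + fuel) + 1 by omega, runG]
      simp [h]
    obtain ⟨t, ht⟩ := step_prefix G s a
    have hdrop' : (stepG G s a).drop (k + 1) = seg ++ (rest ++ t) := by
      rw [← ht, List.drop_append_of_le_length (by omega)]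
      have hd : s.drop (k + 1) = (s.drop k).drop 1 := by rw [List.drop_drop]
      rw [hd, h]
      simp
    rw [show (a :: seg).length + fuel = seg.length + 1 + fuel by simp, hstep,
      ih fuel (stepG G s a) (k + 1) (rest ++ t) hdrop']
    simp only [List.foldl_cons]
    congr 1
    simp
    omega

lemma sweep_eq_run (G : List (List Int)) (m : Nat) :
    ∀ (fuelS : Nat) (s : List (List Int)) (k : Nat), InvS m s → Closed G s k →
      k ≤ s.length → 1 ≤ s.length → (m + 1) ^ m + 1 ≤ fuelS + s.length →
      sweepRef G fuelS s = runG G (2 * (m + 1) ^ m) s k := by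
  intro fuelS
  induction fuelS with
  | zero =>
    intro s k hinv _ _ _ hf
    exfalso
    have := card_bound hinv
    omega
  | succ fuelS ih =>
    intro s k hinv hcl hk h1 hf
    have hofl : PySem.Set.ofList s = s := PySem.Set.ofList_eq_self_of_nodup s hinv.1
    have hnw : s.foldl (stepG G) (PySem.Set.ofList s) = (s.drop k).foldl (stepG G) s := by
      rw [hofl]
      calc List.foldl (stepG G) s s
          = List.foldl (stepG G) s (s.take k ++ s.drop k) := by rw [List.take_append_drop]
        _ = List.foldl (stepG G) (List.foldl (stepG G) s (s.take k)) (s.drop k) := by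
            rw [List.foldl_append]
        _ = List.foldl (stepG G) s (s.drop k) := by rw [foldl_step_eq_of_closed hcl]
    set nw := (s.drop k).foldl (stepG G) s with hnwdef
    have hpre : s <+: nw := foldl_step_prefix G (s.drop k) s
    have hinv' : InvS m nw :=
      invS_foldl hinv (fun a ha => hinv.2 a (List.mem_of_mem_drop ha))
    have hrun : ∀ fuel, runG G ((s.drop k).length + fuel) s k = runG G fuel nw s.length := by
      intro fuel
      have := run_seg G (s.drop k) fuel s k [] (by simp)
      rw [this]
      congr 1
      rw [List.length_drop]
      omega
    have hcard := card_bound hinv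
    have hseglen : (s.drop k).length ≤ s.length := by simp
    rw [sweepRef]
    simp only [hnw]
    by_cases heq : nw.length = s.length
    · have hnws : nw = s := hpre.eq_of_length heq.symm |>.symm
      rw [if_pos heq]
      have hh : runG G (2 * (m + 1) ^ m) s k =
          runG G ((s.drop k).length + (2 * (m + 1) ^ m - (s.drop k).length)) s k := by
        congr 1
        omega
      rw [hh, hrun, hnws]
      exact (runG_terminal G _ s s.length (le_refl _)).symm
    · rw [if_neg heq]
      have hlt : s.length < nw.length := by
        have := hpre.length_le
        omega
      have hcl' : Closed G nw s.length := by
        intro a ha g hg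
        have htake : nw.take s.length = s := by
          obtain ⟨t, ht⟩ := hpre
          rw [← ht, List.take_left]
        rw [htake] at ha
        by_cases hak : a ∈ s.take k
        · exact hpre.subset (hcl a hak g hg)
        · have hadrop : a ∈ s.drop k := by
            rcases (List.mem_append.mp (by rw [List.take_append_drop k s]; exact ha : a ∈ s.take k ++ s.drop k)) with h | h
            · exact absurd h hak
            · exact h
          exact foldl_step_child hadrop g hg
      have := ih nw s.length hinv' hcl' (by omega) (by omega) (by omega)
      rw [this]
      have h2 : runG G (2 * (m + 1) ^ m) s k =
          runG G ((s.drop k).length + (2 * (m + 1) ^ m - (s.drop k).length)) s k := by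
        congr 1
        omega
      rw [h2, hrun]
      exact runG_fuel_eq G m nw s.length hinv' (by omega)
        (2 * (m + 1) ^ m - (s.drop k).length) (2 * (m + 1) ^ m) (by omega) (by omega)

lemma permU_idPerm (n : Int) : PermU n.toNat (pyIdPerm n) := by
  constructor
  · simp [pyIdPerm, PySem.List.length_pyRange_one]
  · intro x hx
    rw [pyIdPerm] at hx
    have := PySem.List.mem_pyRange_one.mp hx
    constructor
    · omega
    · have : x < n := this.2
      have hn : n ≤ (n.toNat : Int) := Int.self_le_toNat n
      omega

lemma invS_singleton (n : Int) : InvS n.toNat [pyIdPerm n] := by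
  refine ⟨by simp, ?_⟩
  intro a ha
  simp at ha
  rw [ha]
  exact permU_idPerm n

-- ===== B-to-reference bridging lemmas =====

lemma map_getD_range (g : List Int) (f : Int → Int) :
    (PySem.List.pyRange 0 (g.length : Int) 1).map (fun i => f (PySem.List.pyGetD g i 0)) =
      g.map f := by
  apply List.ext_getElem
  · simp [PySem.List.length_pyRange_one]
  · intro k h1 h2
    simp only [List.getElem_map, PySem.List.getElem_pyRange_one]
    have hk : k < g.length := by
      simpa [PySem.List.length_pyRange_one] using h1
    rw [show (0 : Int) + k = (k : Int) by ring, PySem.List.pyGetD_natCast g k 0,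
      List.getD_eq_getElem g 0 hk]

lemma pyIdx?_of_range {len : Nat} {j : Int} (h0 : 0 ≤ j) (h1 : j < (len : Int)) :
    PySem.List.pyIdx? len j = some j.toNat := by
  unfold PySem.List.pyIdx?
  split_ifs <;> first | rfl | omega

lemma composeB_eq {p q : List Int} (h : p.length = q.length) :
    pyComposeB p q = pyCompose p q := by
  unfold pyCompose pyComposeB
  rw [h, PySem.List.slice_to_natCast q q.length, List.take_length,
    map_getD_range q (fun j => PySem.List.pyGetD p j 0)]

lemma length_pySetItem (xs : List Int) (j v : Int) : (pySetItem xs j v).length = xs.length := by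
  unfold pySetItem
  rcases h : PySem.List.pyIdx? xs.length j with _ | k <;> simp

lemma pyGetD_pySetItem_self {xs : List Int} {j : Int} (v : Int)
    (h0 : 0 ≤ j) (h1 : j < (xs.length : Int)) :
    PySem.List.pyGetD (pySetItem xs j v) j 0 = v := by
  unfold pySetItem
  rw [pyIdx?_of_range h0 h1]
  have hj : j = ((j.toNat : Nat) : Int) := by omega
  rw [hj, PySem.List.pyGetD_natCast _ j.toNat 0,
    List.getD_eq_getElem _ 0 (by simp; omega)]
  have hmx : (max j 0).toNat = j.toNat := by omega
  simp [hmx]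

-- the extra hypothesis 0 ≤ j restricts this lemma to the writes the equivalence proof meets
lemma pyGetD_pySetItem_ne {xs : List Int} {j k : Int} (v : Int) (hne : k ≠ j) (hj0 : 0 ≤ j)
    (h0 : 0 ≤ k) (h1 : k < (xs.length : Int)) :
    PySem.List.pyGetD (pySetItem xs j v) k 0 = PySem.List.pyGetD xs k 0 := by
  unfold pySetItem
  rcases h : PySem.List.pyIdx? xs.length j with _ | m
  · rfl
  · have hm : m = j.toNat := by
      by_cases hr : j < (xs.length : Int)
      · rw [pyIdx?_of_range hj0 hr] at h
        exact (Option.some.inj h).symm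
      · exfalso
        unfold PySem.List.pyIdx? at h
        split_ifs at h <;> first | exact Option.noConfusion h | omega
    subst hm
    have hk : k = ((k.toNat : Nat) : Int) := by omega
    rw [hk, PySem.List.pyGetD_natCast _ k.toNat 0, PySem.List.pyGetD_natCast _ k.toNat 0,
      List.getD_eq_getElem _ 0 (by simp; omega), List.getD_eq_getElem _ 0 (by omega)]
    rw [List.getElem_set_ne (by omega)]

lemma length_setfold : ∀ (l : List (Int × Int)) (out : List Int),
    (l.foldl (fun o p => pySetItem o p.2 p.1) out).length = out.length := by
  intro l
  induction l with
  | nil => intro out; rfl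
  | cons p t ih => intro out; rw [List.foldl_cons, ih, length_pySetItem]

lemma setfold_preserve : ∀ (l : List (Int × Int)) (out : List Int) (k : Int),
    k ∉ l.map (·.2) → (∀ p ∈ l, 0 ≤ p.2) → 0 ≤ k → k < (out.length : Int) →
    PySem.List.pyGetD (l.foldl (fun o p => pySetItem o p.2 p.1) out) k 0 =
      PySem.List.pyGetD out k 0 := by
  intro l
  induction l with
  | nil => intro out k _ _ _ _; rfl
  | cons p t ih =>
    intro out k hnm hpos h0 h1
    simp only [List.map_cons, List.mem_cons, not_or] at hnm
    rw [List.foldl_cons, ih _ _ hnm.2 (fun q hq => hpos q (by simp [hq])) h0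
        (by rw [length_pySetItem]; exact h1),
      pyGetD_pySetItem_ne _ hnm.1 (hpos p (by simp)) h0 h1]

lemma setfold_get : ∀ (l : List (Int × Int)) (out : List Int) (i k : Int),
    (l.map (·.2)).Nodup → (∀ p ∈ l, 0 ≤ p.2) → (i, k) ∈ l → 0 ≤ k → k < (out.length : Int) →
    PySem.List.pyGetD (l.foldl (fun o p => pySetItem o p.2 p.1) out) k 0 = i := by
  intro l
  induction l with
  | nil => intro out i k _ _ h _ _; simp at h
  | cons p t ih =>
    intro out i k hnd hpos hmem h0 h1
    simp only [List.map_cons, List.nodup_cons] at hnd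
    rcases List.mem_cons.mp hmem with rfl | hmem
    · rw [List.foldl_cons,
        setfold_preserve t _ k (by simpa using hnd.1) (fun q hq => hpos q (by simp [hq])) h0
          (by rw [length_pySetItem]; exact h1),
        pyGetD_pySetItem_self _ h0 h1]
    · rw [List.foldl_cons]
      exact ih _ i k hnd.2 (fun q hq => hpos q (by simp [hq])) hmem h0
        (by rw [length_pySetItem]; exact h1)

lemma length_pyInv (p : List Int) : (pyInv p).length = p.length := by
  unfold pyInv
  rw [length_setfold]
  simp

-- a nodup list of length m with entries in [0, m) contains every j in [0, m)
lemma perm_surj {g : List Int} (hnd : g.Nodup) (hb : ∀ x ∈ g, 0 ≤ x ∧ x < (g.length : Int)) :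
    ∀ j : Int, 0 ≤ j → j < (g.length : Int) → j ∈ g := by
  intro j h0 h1
  have hsub : g.toFinset ⊆ Finset.Ico (0 : Int) (g.length : Int) := by
    intro x hx
    rw [List.mem_toFinset] at hx
    simp [Finset.mem_Ico]
    exact ⟨(hb x hx).1, (hb x hx).2⟩
  have hcard : (Finset.Ico (0 : Int) (g.length : Int)).card ≤ g.toFinset.card := by
    rw [List.toFinset_card_of_nodup hnd, Int.card_Ico]
    simp
  have heq := Finset.eq_of_subset_of_card_le hsub hcard
  have : j ∈ g.toFinset := by
    rw [heq]
    simp [Finset.mem_Ico]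
    omega
  exact List.mem_toFinset.mp this

-- every entry of A's inverse is the (unique) preimage of its position
lemma inv_elem {g : List Int} (hnd : g.Nodup)
    (hb : ∀ x ∈ g, 0 ≤ x ∧ x < (g.length : Int)) :
    ∀ t : Nat, ∀ ht : t < (pyInv g).length,
      ∃ i : Nat, ∃ hi : i < g.length, (pyInv g)[t] = (i : Int) ∧ g[i] = (t : Int) := by
  intro t ht
  have htg : t < g.length := by rw [length_pyInv] at ht; exact ht
  have hkeys : ((PySem.List.enumerate g 0).map (·.2)).Nodup := by
    rw [PySem.List.map_snd_enumerate]
    exact hnd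
  have hjmem : ((t : Int)) ∈ g := perm_surj hnd hb t (by omega) (by exact_mod_cast htg)
  obtain ⟨i, hi, hgi⟩ := List.getElem_of_mem hjmem
  have hpair : ((i : Int), (t : Int)) ∈ PySem.List.enumerate g 0 := by
    rw [PySem.List.enumerate_eq_map_pyRange g (0 : Int)]
    rw [List.mem_map]
    refine ⟨(i : Int), ?_, ?_⟩
    · rw [PySem.List.mem_pyRange_one]
      constructor <;> [omega; (simp [PySem.List.len]; exact_mod_cast hi)]
    · rw [PySem.List.pyGetD_natCast g i 0, List.getD_eq_getElem g 0 hi, hgi]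
  have hpos : ∀ p ∈ PySem.List.enumerate g 0, 0 ≤ p.2 := by
    intro p hp
    have : p.2 ∈ g := by
      rw [← PySem.List.map_snd_enumerate g 0]
      exact List.mem_map_of_mem hp
    exact (hb _ this).1
  have hAside : PySem.List.pyGetD (pyInv g) (t : Int) 0 = (i : Int) := by
    unfold pyInv
    exact setfold_get _ _ (i : Int) (t : Int) hkeys hpos hpair (by omega)
      (by simp; exact_mod_cast htg)
  refine ⟨i, hi, ?_, hgi⟩
  have hcast : PySem.List.pyGetD (pyInv g) (t : Int) 0 = (pyInv g).getD t 0 :=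
    PySem.List.pyGetD_natCast (pyInv g) t 0
  rw [List.getD_eq_getElem (pyInv g) 0 ht] at hcast
  rw [← hcast, hAside]

-- B's sorted-by-image inverse equals A's index-write inverse on genuine permutations
lemma invB_eq {g : List Int} (hnd : g.Nodup)
    (hb : ∀ x ∈ g, 0 ≤ x ∧ x < (g.length : Int)) : pyInvB g = pyInv g := by
  have hlen : (pyInv g).length = g.length := length_pyInv g
  have hmapkey : (pyInv g).map (fun i => PySem.List.pyGetD g i 0) =
      PySem.List.pyRange 0 (g.length : Int) 1 := by
    apply List.ext_getElem
    · simp [hlen, PySem.List.length_pyRange_one]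
    · intro t h1 h2
      obtain ⟨i, hi, hit, hgi⟩ := inv_elem hnd hb t (by simpa using h1)
      simp only [List.getElem_map, PySem.List.getElem_pyRange_one]
      rw [hit, PySem.List.pyGetD_natCast g i 0, List.getD_eq_getElem g 0 hi, hgi]
      ring
  have hnd' : (pyInv g).Nodup := by
    have := PySem.List.nodup_pyRange_one (0 : Int) (g.length : Int)
    rw [← hmapkey] at this
    exact this.of_map
  have hperm : (pyInv g).Perm (PySem.List.pyRange 0 (g.length : Int) 1) := by
    have hsub : pyInv g ⊆ PySem.List.pyRange 0 (g.length : Int) 1 := by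
      intro x hx
      obtain ⟨t, ht, rfl⟩ := List.getElem_of_mem hx
      obtain ⟨i, hi, hit, _⟩ := inv_elem hnd hb t ht
      rw [hit, PySem.List.mem_pyRange_one]
      constructor <;> [omega; exact_mod_cast hi]
    exact (List.subperm_of_subset hnd' hsub).perm_of_length_le
      (by simp [hlen, PySem.List.length_pyRange_one])
  have hpw : (pyInv g).Pairwise
      (fun a b => PySem.List.pyGetD g a 0 < PySem.List.pyGetD g b 0) := by
    have := PySem.List.pairwise_lt_pyRange_one (0 : Int) (g.length : Int)
    rw [← hmapkey, List.pairwise_map] at this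
    exact this
  exact PySem.List.sorted_eq_of_perm_of_pairwise_lt _ _ _ hperm hpw

-- B's inner double fold is the reference step fold, given uniform lengths
lemma stepB_eq {G : List (List Int)} {m : Nat} (hG : ∀ g ∈ G, g.length = m) :
    ∀ (nw : List (List Int)) (a : List Int), a.length = m →
      G.foldl (fun nw g => PySem.Set.add nw (pyComposeB a g)) nw = stepG G nw a := by
  induction G with
  | nil => intro nw a _; rfl
  | cons g G ih =>
    intro nw a ha
    rw [List.foldl_cons, composeB_eq (by rw [ha, hG g (by simp)])]
    exact ih (fun g' hg' => hG g' (by simp [hg'])) _ a ha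

lemma sweepB_eq_ref {G : List (List Int)} {m : Nat} (hG : ∀ g ∈ G, g.length = m) :
    ∀ (fuel : Nat) (cur : List (List Int)), InvS m cur →
      sweepLoop G fuel cur = sweepRef G fuel cur := by
  intro fuel
  induction fuel with
  | zero => intro cur _; rfl
  | succ fuel ih =>
    intro cur hinv
    have hfold : cur.foldl
        (fun nw a => G.foldl (fun nw g => PySem.Set.add nw (pyComposeB a g)) nw)
        (PySem.Set.ofList cur) = cur.foldl (stepG G) (PySem.Set.ofList cur) := by
      apply PySem.List.foldl_congr_mem
      intro nw a ha
      exact stepB_eq hG nw a (hinv.2 a ha).1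
    rw [sweepLoop, sweepRef]
    simp only [hfold]
    split_ifs with h
    · rfl
    · apply ih
      rw [PySem.Set.ofList_eq_self_of_nodup cur hinv.1]
      exact invS_foldl hinv (fun a ha => hinv.2 a ha)

lemma foldl_append_eq_map (l : List (List Int)) (f : List Int → List Int) :
    ∀ acc, l.foldl (fun acc g => acc ++ [f g]) acc = acc ++ l.map f := by
  induction l with
  | nil => intro acc; simp
  | cons g t ih => intro acc; rw [List.foldl_cons, ih]; simp

-- ===== the degenerate branch: n ≤ 0, the identity is the empty tuple =====

lemma pyCompose_nil (g : List Int) : pyCompose [] g = [] := by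
  simp [pyCompose, PySem.List.pyRange_one_eq_nil]

lemma pyComposeB_nil (g : List Int) : pyComposeB [] g = [] := by
  unfold pyComposeB
  have : PySem.List.slice g none (some ((([] : List Int).length : Nat) : Int)) =
      g.take ([] : List Int).length := PySem.List.slice_to_natCast g _
  simp at this
  simp [this]

lemma bfsLoop_nilq (G : List (List Int)) : ∀ fuel seen, bfsLoop G fuel seen [] = seen := by
  intro fuel seen
  cases fuel <;> rfl

lemma bfs_nilcase (G : List (List Int)) (fuel : Nat) :
    bfsLoop G (fuel + 1) [[]] [[]] = [[]] := by
  rw [bfsLoop]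
  have hstep : stepG G [[]] [] = [[]] :=
    step_eq_of_closed (fun g _ => by rw [pyCompose_nil]; simp)
  rw [bfs_fold G [] [[]] []]
  simp only [hstep, List.length_singleton, List.drop_one, List.tail_cons, List.append_nil]
  exact bfsLoop_nilq G fuel [[]]

lemma foldB_nil_mem : ∀ (G : List (List Int)) (s : List (List Int)), ([] : List Int) ∈ s →
    G.foldl (fun nw g => PySem.Set.add nw (pyComposeB [] g)) s = s := by
  intro G
  induction G with
  | nil => intro s _; rfl
  | cons g G ih =>
    intro s hs
    rw [List.foldl_cons, pyComposeB_nil, add_eq_of_mem hs]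
    exact ih s hs

lemma sweep_nilcase (G : List (List Int)) (fuel : Nat) :
    sweepLoop G (fuel + 1) [[]] = [[]] := by
  rw [sweepLoop]
  have hofl : PySem.Set.ofList [([] : List Int)] = [[]] :=
    PySem.Set.ofList_eq_self_of_nodup _ (by simp)
  simp only [List.foldl_cons, List.foldl_nil, hofl]
  rw [foldB_nil_mem G [[]] (by simp)]
  simp

-- ===== VERDICT (by name: the statement is the Claim_ definition above) =====
theorem group_from_generators_py_spec : Claim_equal_group_from_generators_py := by
  intro gens n _ hpre
  unfold Spec_group_from_generators_py
  show group_from_generators_py gens n = group_from_generators_py_alt gens n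
  rcases hpre with hpre | ⟨hn, _⟩
  · -- genuine permutations of range(n)
    have hinvmap : gens.foldl (fun acc g => acc ++ [pyInvB g]) [] = gens.map pyInv := by
      rw [foldl_append_eq_map]
      simp only [List.nil_append]
      apply List.map_congr_left
      intro g hg
      obtain ⟨hlen, hnd, hb⟩ := hpre g hg
      exact invB_eq hnd (fun x hx => ⟨(hb x hx).1, by rw [hlen]; exact (hb x hx).2⟩)
    have hGlen : ∀ g ∈ gens ++ gens.map pyInv, g.length = n.toNat := by
      intro g hg
      rcases List.mem_append.mp hg with hg | hg
      · have := (hpre g hg).1; omega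
      · obtain ⟨g0, hg0, rfl⟩ := List.mem_map.mp hg
        rw [length_pyInv]
        have := (hpre g0 hg0).1; omega
    have hinv : InvS n.toNat [pyIdPerm n] := invS_singleton n
    have hofl : PySem.Set.ofList [pyIdPerm n] = [pyIdPerm n] :=
      PySem.Set.ofList_eq_self_of_nodup _ (by simp)
    simp only [group_from_generators_py, group_from_generators_py_alt, hinvmap]
    show bfsLoop (gens ++ gens.map pyInv) (2 * (n.toNat + 1) ^ n.toNat + 2)
        (PySem.Set.ofList [pyIdPerm n]) [pyIdPerm n]
      = sweepLoop (gens ++ gens.map pyInv) ((n.toNat + 1) ^ n.toNat + 2)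
        (PySem.Set.ofList [pyIdPerm n])
    rw [hofl]
    have hA := bfs_eq_run (gens ++ gens.map pyInv) (2 * (n.toNat + 1) ^ n.toNat + 2)
      [pyIdPerm n] 0 (by simp)
    simp only [List.drop_zero] at hA
    rw [hA]
    rw [runG_fuel_eq (gens ++ gens.map pyInv) n.toNat [pyIdPerm n] 0 hinv (by simp)
      (2 * (n.toNat + 1) ^ n.toNat) (2 * (n.toNat + 1) ^ n.toNat + 2) (by omega) (by simp)]
    rw [sweepB_eq_ref hGlen ((n.toNat + 1) ^ n.toNat + 2) [pyIdPerm n] hinv]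
    exact (sweep_eq_run (gens ++ gens.map pyInv) n.toNat ((n.toNat + 1) ^ n.toNat + 2)
      [pyIdPerm n] 0 hinv (by intro a ha; simp at ha) (by simp) (by simp) (by omega)).symm
  · -- n ≤ 0: both closures are {()}
    have he : pyIdPerm n = [] := PySem.List.pyRange_one_eq_nil hn
    simp only [group_from_generators_py, group_from_generators_py_alt, he]
    show bfsLoop _ (2 * (n.toNat + 1) ^ n.toNat + 2) (PySem.Set.ofList [([] : List Int)]) [[]]
      = sweepLoop _ ((n.toNat + 1) ^ n.toNat + 2)
        (PySem.Set.ofList [PySem.List.pyRange 0 n 1])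
    have hofl : PySem.Set.ofList [([] : List Int)] = [[]] :=
      PySem.Set.ofList_eq_self_of_nodup _ (by simp)
    have he' : PySem.List.pyRange 0 n 1 = ([] : List Int) := PySem.List.pyRange_one_eq_nil hn
    rw [hofl, he']
    rw [show 2 * (n.toNat + 1) ^ n.toNat + 2 = (2 * (n.toNat + 1) ^ n.toNat + 1) + 1 from rfl,
      bfs_nilcase, hofl,
      show (n.toNat + 1) ^ n.toNat + 2 = ((n.toNat + 1) ^ n.toNat + 1) + 1 from rfl,
      sweep_nilcase]
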